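-- pv_equiv track=rewrite | github.com/FXC-ai/python | AlgoRepartitionGain.py | algoRepartGain
-- ===== SOURCE A (Python) =====
-- def algoRepartGain (nbr_individus):
-- 	i = 0
-- 	limite = 0
-- 	list_repartition = []
-- 	while limite < nbr_individus :
-- 		i+=1
-- 		limite += i
-- 		list_repartition.append(i)
--
-- 	reste_a_distribuer = sum(list_repartition) - nbr_individus
--
-- 	c = 0
-- 	while reste_a_distribuer > 0:
-- 		list_repartition[c] -= 1
-- 		reste_a_distribuer -= 1
-- 		c += 1
--
-- 	return list_repartition
-- ===== SOURCE B (Python) =====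
-- def algoRepartGain(nbr_individus):
--     if nbr_individus <= 0:
--         return []
--     # binary search: smallest i in [1, nbr] with i*(i+1)//2 >= nbr
--     lo, hi = 1, nbr_individus
--     while lo < hi:
--         mid = (lo + hi) // 2
--         if mid * (mid + 1) // 2 >= nbr_individus:
--             hi = mid
--         else:
--             lo = mid + 1
--     reste = lo * (lo + 1) // 2 - nbr_individus
--     return list(range(reste)) + list(range(reste + 1, lo + 1))
-- ===== Notes on version B (the rewrite author's own statement) =====
-- stated objective: alternative
-- what changed: Replaces A's incremental accumulation loop and the in-place decrement pass by a binary search for the triangular bound plus direct construction of the result from two ranges.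
import Mathlib
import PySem

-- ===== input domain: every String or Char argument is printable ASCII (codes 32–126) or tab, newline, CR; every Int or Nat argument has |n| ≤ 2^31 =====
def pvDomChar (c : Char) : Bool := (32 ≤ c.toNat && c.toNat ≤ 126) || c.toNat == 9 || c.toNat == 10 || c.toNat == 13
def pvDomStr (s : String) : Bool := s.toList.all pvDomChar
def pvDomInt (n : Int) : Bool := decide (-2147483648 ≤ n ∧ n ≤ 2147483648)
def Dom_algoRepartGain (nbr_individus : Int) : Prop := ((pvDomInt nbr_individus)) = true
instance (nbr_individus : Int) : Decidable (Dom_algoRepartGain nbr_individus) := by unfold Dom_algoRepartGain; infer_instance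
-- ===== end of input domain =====

-- B replaces A's two mutation loops by a binary search for the triangular bound
-- plus direct construction of the result from two ranges (objective: alternative).

-- ===== PORT A =====
-- first while loop of A: i += 1; limite += i; list_repartition.append(i)
-- (fuel only makes the recursion structural; nbr.toNat steps always suffice)
def algoRepartGainLoop1 (fuel : Nat) (nbr i limite : Int) (lst : List Int) : List Int :=
  match fuel with
  | 0 => lst
  | fuel + 1 =>
    if limite < nbr then
      algoRepartGainLoop1 fuel nbr (i + 1) (limite + (i + 1)) (lst ++ [i + 1])
    else lst

-- second while loop of A: list_repartition[c] -= 1; reste -= 1; c += 1; it runs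
-- exactly reste.toNat times (List.modify no-ops exactly where Python's indexing
-- would raise IndexError; Pre_ excludes that)
def algoRepartGainLoop2 (fuel : Nat) (lst : List Int) (reste c : Int) : List Int :=
  match fuel with
  | 0 => lst
  | fuel + 1 =>
    if reste > 0 then
      algoRepartGainLoop2 fuel (lst.modify c.toNat (· - 1)) (reste - 1) (c + 1)
    else lst

def algoRepartGain (nbr_individus : Int) : List Int :=
  let lst := algoRepartGainLoop1 nbr_individus.toNat nbr_individus 0 0 []
  algoRepartGainLoop2 (lst.sum - nbr_individus).toNat lst (lst.sum - nbr_individus) 0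

-- ===== PORT B =====
-- binary search of Source B: smallest i in [lo, hi] with i*(i+1)//2 >= nbr
-- (fuel only makes the recursion structural; (hi - lo).toNat steps always suffice)
def algoRepartGainBS (fuel : Nat) (nbr lo hi : Int) : Int :=
  match fuel with
  | 0 => lo
  | fuel + 1 =>
    if lo < hi then
      let mid := PySem.Int.floordiv (lo + hi) 2
      if nbr ≤ PySem.Int.floordiv (mid * (mid + 1)) 2 then
        algoRepartGainBS fuel nbr lo mid
      else
        algoRepartGainBS fuel nbr (mid + 1) hi
    else lo

def algoRepartGain_alt (nbr_individus : Int) : List Int :=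
  if nbr_individus ≤ 0 then []
  else
    let lo := algoRepartGainBS (nbr_individus - 1).toNat nbr_individus 1 nbr_individus
    let reste := PySem.Int.floordiv (lo * (lo + 1)) 2 - nbr_individus
    PySem.List.pyRange 0 reste 1 ++ PySem.List.pyRange (reste + 1) (lo + 1) 1

-- ===== PRECONDITION & SPEC =====
-- Pre_ excludes exactly the negative inputs, on which A raises IndexError
-- (the remainder-distribution loop indexes into the empty list); B returns an empty list there.
def Pre_algoRepartGain (nbr_individus : Int) : Prop := 0 ≤ nbr_individus
instance (nbr_individus : Int) : Decidable (Pre_algoRepartGain nbr_individus) := by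
  unfold Pre_algoRepartGain; infer_instance
def pvWitness_algoRepartGain : Int := 7

def Spec_algoRepartGain (nbr_individus : Int) (out : List Int) : Prop := out = algoRepartGain_alt nbr_individus
instance (nbr_individus : Int) (out : List Int) : Decidable (Spec_algoRepartGain nbr_individus out) := by unfold Spec_algoRepartGain; infer_instance

-- ===== CLAIM (what is proved, stated in full; the proofs are below) =====
def Claim_equal_algoRepartGain : Prop := ∀ (nbr_individus : Int), Dom_algoRepartGain nbr_individus → Pre_algoRepartGain nbr_individus → Spec_algoRepartGain nbr_individus (algoRepartGain nbr_individus)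

-- ===== LEMMAS AND PROOFS =====

-- tri i = i*(i+1)//2, exactly as both ports compute it
def tri (i : Int) : Int := PySem.Int.floordiv (i * (i + 1)) 2

theorem two_mul_tri (i : Int) : 2 * tri i = i * (i + 1) := by
  obtain ⟨k, hk⟩ := Int.even_mul_succ_self i
  simp only [tri, PySem.Int.floordiv, Int.fdiv_eq_ediv]
  omega

theorem tri_mono {a b : Int} (ha : 0 ≤ a) (hab : a ≤ b) : tri a ≤ tri b := by
  have h1 := two_mul_tri a
  have h2 := two_mul_tri b
  nlinarith

theorem tri_self_ge {n : Int} (hn : 1 ≤ n) : n ≤ tri n := by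
  have := two_mul_tri n; nlinarith

theorem bs_spec (nbr : Int) : ∀ (fuel : Nat) (lo hi : Int), (hi - lo).toNat ≤ fuel →
    1 ≤ lo → lo ≤ hi → tri (lo - 1) < nbr → nbr ≤ tri hi →
    let r := algoRepartGainBS fuel nbr lo hi
    lo ≤ r ∧ r ≤ hi ∧ nbr ≤ tri r ∧ tri (r - 1) < nbr := by
  intro fuel
  induction fuel with
  | zero =>
    intro lo hi hf h1 h2 h3 h4
    have heq : lo = hi := by omega
    exact ⟨le_refl _, le_of_eq heq, heq ▸ h4, h3⟩
  | succ fuel ih =>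
    intro lo hi hf h1 h2 h3 h4
    by_cases hlt : lo < hi
    · rw [algoRepartGainBS]
      simp only [if_pos hlt]
      have hm : lo ≤ PySem.Int.floordiv (lo + hi) 2 ∧ PySem.Int.floordiv (lo + hi) 2 < hi := by
        simp only [PySem.Int.floordiv, Int.fdiv_eq_ediv]; omega
      by_cases hle : nbr ≤ PySem.Int.floordiv (PySem.Int.floordiv (lo + hi) 2 * (PySem.Int.floordiv (lo + hi) 2 + 1)) 2
      · rw [if_pos hle]
        have := ih lo (PySem.Int.floordiv (lo + hi) 2) (by omega) h1 hm.1 h3 hle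
        exact ⟨this.1, by omega, this.2.2⟩
      · rw [if_neg hle]
        have h5 : tri (PySem.Int.floordiv (lo + hi) 2 + 1 - 1) < nbr := by
          simp only [add_sub_cancel_right]; exact not_le.mp hle
        have := ih (PySem.Int.floordiv (lo + hi) 2 + 1) hi (by omega) (by omega) (by omega) h5 h4
        exact ⟨by omega, this.2.1, this.2.2⟩
    · rw [algoRepartGainBS]
      simp only [if_neg hlt]
      have heq : lo = hi := by omega
      exact ⟨le_refl _, le_of_eq heq, heq ▸ h4, h3⟩

theorem loop1_eq_range (nbr j : Int) (hj0 : 0 ≤ j) (h2 : nbr ≤ tri j) (h3 : tri (j - 1) < nbr) :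
    ∀ (fuel : Nat) (i : Int), 0 ≤ i → i ≤ j → (j - i).toNat ≤ fuel → ∀ (lst : List Int),
    algoRepartGainLoop1 fuel nbr i (tri i) lst = lst ++ PySem.List.pyRange (i + 1) (j + 1) 1 := by
  intro fuel
  induction fuel with
  | zero =>
    intro i hi hij hf lst
    have heq : i = j := by omega
    subst heq
    rw [algoRepartGainLoop1, PySem.List.pyRange_one_eq_nil (le_refl _), List.append_nil]
  | succ fuel ih =>
    intro i hi hij hf lst
    by_cases hcase : i = j
    · subst hcase
      rw [algoRepartGainLoop1]
      simp only [if_neg (not_lt.mpr h2)]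
      rw [PySem.List.pyRange_one_eq_nil (le_refl _), List.append_nil]
    · have hlt : i < j := lt_of_le_of_ne hij hcase
      have htri : tri i < nbr := lt_of_le_of_lt (tri_mono hi (by omega)) h3
      have hstep : tri i + (i + 1) = tri (i + 1) := by
        have a := two_mul_tri i
        have b := two_mul_tri (i + 1)
        have : (i + 1) * (i + 1 + 1) = i * (i + 1) + 2 * (i + 1) := by ring
        omega
      rw [algoRepartGainLoop1]
      simp only [if_pos htri]
      rw [hstep, ih (i + 1) (by omega) (by omega) (by omega),
        PySem.List.pyRange_one_cons (by omega : i + 1 < j + 1)]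
      simp

theorem loop2_getElem? : ∀ (fuel : Nat) (reste : Int), reste.toNat ≤ fuel →
    ∀ (lst : List Int) (c : Int), 0 ≤ c → ∀ (k : Nat),
    (algoRepartGainLoop2 fuel lst reste c)[k]? =
      if c ≤ (k : Int) ∧ (k : Int) < c + reste then lst[k]?.map (· - 1) else lst[k]? := by
  intro fuel
  induction fuel with
  | zero =>
    intro reste hf lst c hc k
    rw [algoRepartGainLoop2, if_neg (by omega)]
  | succ fuel ih =>
    intro reste hf lst c hc k
    by_cases hr : reste > 0
    · rw [algoRepartGainLoop2]
      simp only [if_pos hr]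
      rw [ih (reste - 1) (by omega) _ (c + 1) (by omega) k, List.getElem?_modify]
      by_cases hk : c.toNat = k
      · rw [if_neg (by omega), if_pos (by constructor <;> omega)]
        cases lst[k]? <;> simp [hk]
      · by_cases h2 : c + 1 ≤ (k : Int) ∧ (k : Int) < c + 1 + (reste - 1)
        · rw [if_pos h2, if_pos (by constructor <;> omega)]
          cases lst[k]? <;> simp [hk]
        · rw [if_neg h2, if_neg (by omega)]
          cases lst[k]? <;> simp [hk]
    · rw [algoRepartGainLoop2]
      simp only [if_neg hr]
      rw [if_neg (by omega)]

theorem sum_pyRange_one (j : Int) (hj : 0 ≤ j) :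
    (PySem.List.pyRange 1 (j + 1) 1).sum = tri j := by
  induction j, hj using Int.le_induction with
  | base =>
    norm_num [show tri 0 = 0 from rfl]
  | succ j hj ih =>
    rw [PySem.List.pyRange_one_succ_right (by omega), List.sum_append]
    have a := two_mul_tri j
    have b := two_mul_tri (j + 1)
    have : (j + 1) * (j + 1 + 1) = j * (j + 1) + 2 * (j + 1) := by ring
    simp [ih]
    omega

-- ===== VERDICT (by name: the statement is the Claim_ definition above) =====
theorem algoRepartGain_spec : Claim_equal_algoRepartGain := by
  unfold Claim_equal_algoRepartGain Spec_algoRepartGain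
  intro n hdom hpre
  unfold Pre_algoRepartGain at hpre
  by_cases hn : n ≤ 0
  · have h0 : n = 0 := le_antisymm hn hpre
    subst h0; decide
  · rw [not_le] at hn
    have hbase := bs_spec n (n - 1).toNat 1 n (by omega) (le_refl 1) (by omega)
      (by show tri 0 < n; have h00 : tri 0 = 0 := rfl; omega)
      (tri_self_ge (by omega))
    set j := algoRepartGainBS (n - 1).toNat n 1 n with hjdef
    obtain ⟨hj1, hjn, hjt, hjl⟩ := hbase
    have hrj : tri j - n < j := by
      have a := two_mul_tri j
      have b := two_mul_tri (j - 1)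
      have : j * (j + 1) = (j - 1) * (j - 1 + 1) + 2 * j := by ring
      omega
    have hr0 : 0 ≤ tri j - n := by omega
    have hL1 : algoRepartGainLoop1 n.toNat n 0 0 [] = PySem.List.pyRange 1 (j + 1) 1 := by
      have h := loop1_eq_range n j (by omega) hjt hjl n.toNat 0 (le_refl 0) (by omega) (by omega) []
      simpa using h
    have hsum : (PySem.List.pyRange 1 (j + 1) 1).sum = tri j := sum_pyRange_one j (by omega)
    have htri : PySem.Int.floordiv (j * (j + 1)) 2 = tri j := rfl
    simp only [algoRepartGain, algoRepartGain_alt, if_neg (by omega : ¬ n ≤ 0)]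
    rw [← hjdef, hL1, hsum]
    simp only [htri]
    apply List.ext_getElem?
    intro k
    rw [loop2_getElem? (tri j - n).toNat (tri j - n) (le_refl _) _ 0 (le_refl 0) k,
      List.getElem?_append, PySem.List.getElem?_pyRange_one,
      PySem.List.getElem?_pyRange_one, PySem.List.getElem?_pyRange_one,
      PySem.List.length_pyRange_one]
    by_cases h1 : (k : Int) < tri j - n
    · rw [if_pos (by constructor <;> omega), if_pos (by omega : k < (j + 1 - 1).toNat),
        if_pos (by omega : k < (tri j - n - 0).toNat), if_pos (by omega : k < (tri j - n - 0).toNat)]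
      simp only [Option.map_some, Option.some.injEq]
      omega
    · rw [if_neg (by omega), if_neg (by omega : ¬ k < (tri j - n - 0).toNat)]
      by_cases h2 : (k : Int) < j
      · rw [if_pos (by omega : k < (j + 1 - 1).toNat),
          if_pos (by omega : k - (tri j - n - 0).toNat < (j + 1 - (tri j - n + 1)).toNat)]
        simp only [Option.some.injEq]
        omega
      · rw [if_neg (by omega : ¬ k < (j + 1 - 1).toNat),
          if_neg (by omega : ¬ k - (tri j - n - 0).toNat < (j + 1 - (tri j - n + 1)).toNat)]
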